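-- pv_equiv track=rewrite | github.com/sashaboriskin/homework | metro(olimpiad).py | recurse
-- ===== SOURCE A (Python) =====
-- def recurse(A, a, b, n):
--   if n == 0:
--     for l in range(len(A)):
--       if a in A[l] and b in A[l]:
--         return True
--   else:
--     for l in range(len(A)):
--       if a in A[l]:
--         B = A[:] #deep copy
--         B.pop(l)
--         for h in range(len(A[l])):
--           if recurse(B, A[l][h], b, n-1):
--             return True
--   return False
-- ===== SOURCE B (Python) =====
-- def recurse(A, a, b, n):
--     # Layered frontier search over the line-intersection graph: each state is
--     # (remaining lines, last line taken); deduplicated with a set.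
--     if n < 0:
--         return False
--     lines = [tuple(l) for l in A]
--     frontier = set()
--     for i, l in enumerate(lines):
--         if a in l:
--             frontier.add((tuple(lines[:i] + lines[i + 1:]), l))
--     for _ in range(n):
--         if not frontier:
--             return False
--         nxt = set()
--         for rest, last in frontier:
--             for i, l in enumerate(rest):
--                 if any(s in l for s in last):
--                     nxt.add((tuple(rest[:i] + rest[i + 1:]), l))
--         frontier = nxt
--     return any(b in last for _, last in frontier)
-- ===== Notes on version B (the rewrite author's own statement) =====
-- stated objective: alternative
-- what changed: Replaces A's depth-first recursion that branches over every station of every line (copying and popping the line list at each call) by an iterative layered frontier search over the line-intersection graph whose states (remaining lines, last line) are deduplicated in a set, with an early exit once the frontier is empty.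
import Mathlib
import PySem

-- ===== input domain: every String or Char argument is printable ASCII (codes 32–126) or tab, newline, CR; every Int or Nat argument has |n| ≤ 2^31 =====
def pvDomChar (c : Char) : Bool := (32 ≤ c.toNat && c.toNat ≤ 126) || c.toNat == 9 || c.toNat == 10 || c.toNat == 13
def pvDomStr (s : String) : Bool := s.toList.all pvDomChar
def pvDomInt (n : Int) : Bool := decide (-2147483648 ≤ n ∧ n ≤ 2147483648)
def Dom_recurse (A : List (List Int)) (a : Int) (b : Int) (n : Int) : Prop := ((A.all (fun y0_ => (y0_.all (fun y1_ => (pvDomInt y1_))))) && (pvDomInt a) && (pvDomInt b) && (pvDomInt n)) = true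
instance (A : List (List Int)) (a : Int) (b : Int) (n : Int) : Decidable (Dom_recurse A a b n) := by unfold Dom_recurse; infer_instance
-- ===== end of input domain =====

-- B replaces A's station-branching depth-first recursion by an iterative, set-deduplicated
-- layered frontier search over line intersections (objective: alternative algorithm, same cost).

-- ===== PORT A =====
-- A recurses on a copy of the list with one line popped, so the list length strictly
-- decreases; `fuel` (initially A.length) makes that structural.  The `fuel = 0` fallback
-- only triggers when A = [], where the Python loop also falls through to False.
def recurseF : Nat → List (List Int) → Int → Int → Int → Bool
  | 0, A, a, b, n =>
    if n = 0 then
      (List.range A.length).any (fun l => (A.getD l []).contains a && (A.getD l []).contains b)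
    else false
  | fuel+1, A, a, b, n =>
    if n = 0 then
      (List.range A.length).any (fun l => (A.getD l []).contains a && (A.getD l []).contains b)
    else
      (List.range A.length).any (fun l =>
        (A.getD l []).contains a &&
        (List.range (A.getD l []).length).any (fun h =>
          recurseF fuel (A.eraseIdx l) ((A.getD l []).getD h 0) b (n-1)))

def recurse (A : List (List Int)) (a : Int) (b : Int) (n : Int) : Bool :=
  recurseF A.length A a b n

-- ===== PORT B =====
-- initial frontier: {(lines minus line i, line i) | a in line i}
def initB (A : List (List Int)) (a : Int) : PySem.Set (List (List Int) × List Int) :=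
  (PySem.List.enumerate A).foldl
    (fun fr il => if il.2.contains a then PySem.Set.add fr (A.eraseIdx il.1.toNat, il.2) else fr)
    PySem.Set.empty

-- one step: extend each state by a not-yet-used line meeting the last line
def stepB (fr : PySem.Set (List (List Int) × List Int)) : PySem.Set (List (List Int) × List Int) :=
  fr.foldl
    (fun nxt rl =>
      (PySem.List.enumerate rl.1).foldl
        (fun nxt il =>
          if rl.2.any (fun s => il.2.contains s) then
            PySem.Set.add nxt (rl.1.eraseIdx il.1.toNat, il.2)
          else nxt)
        nxt)
    PySem.Set.empty

-- the 'for _ in range(n)' loop with the early 'if not frontier: return False'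
def loopB (b : Int) : Nat → PySem.Set (List (List Int) × List Int) → Bool
  | 0, fr => fr.any (fun rl => rl.2.contains b)
  | k+1, fr => if fr.isEmpty then false else loopB b k (stepB fr)

def recurse_alt (A : List (List Int)) (a : Int) (b : Int) (n : Int) : Bool :=
  if n < 0 then false
  else loopB b n.toNat (initB A a)

-- ===== PRECONDITION & SPEC =====
def Spec_recurse (A : List (List Int)) (a : Int) (b : Int) (n : Int) (out : Bool) : Prop := out = recurse_alt A a b n
instance (A : List (List Int)) (a : Int) (b : Int) (n : Int) (out : Bool) : Decidable (Spec_recurse A a b n out) := by unfold Spec_recurse; infer_instance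

-- ===== CLAIM (what is proved, stated in full; the proofs are below) =====
def Claim_equal_recurse : Prop := ∀ (A : List (List Int)) (a : Int) (b : Int) (n : Int), Dom_recurse A a b n → Spec_recurse A a b n (recurse A a b n)

-- ===== LEMMAS AND PROOFS =====

-- FC S l0 k l r: starting after a line l0 with lines S still unused, one can pick k further
-- lines (each meeting its predecessor), ending at line l with remainder r.
inductive FC : List (List Int) → List Int → Nat → List Int → List (List Int) → Prop
  | zero (S : List (List Int)) (l0 : List Int) : FC S l0 0 l0 S
  | succ {S : List (List Int)} {l0 : List Int} {k : Nat} {l : List Int} {r : List (List Int)}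
      (i : Nat) (hi : i < S.length) (hx : ∃ s ∈ l0, s ∈ S.getD i [])
      (h : FC (S.eraseIdx i) (S.getD i []) k l r) : FC S l0 (k+1) l r

theorem recurseF_neg (fuel : Nat) : ∀ (A : List (List Int)) (a b n : Int), n < 0 →
    recurseF fuel A a b n = false := by
  induction fuel with
  | zero => intro A a b n hn; rw [recurseF, if_neg (by omega : ¬ n = 0)]
  | succ f ih =>
    intro A a b n hn
    rw [recurseF, if_neg (by omega : ¬ n = 0)]
    rw [List.any_eq_false]
    intro l _
    simp only [Bool.and_eq_true, not_and, List.any_eq_true, not_exists]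
    intro _ h _
    simp [ih _ _ _ _ (by omega : n - 1 < 0)]

theorem FC_zero_iff (S : List (List Int)) (l0 l : List Int) (r : List (List Int)) :
    FC S l0 0 l r ↔ l = l0 ∧ r = S := by
  constructor
  · rintro h; cases h; exact ⟨rfl, rfl⟩
  · rintro ⟨rfl, rfl⟩; exact FC.zero _ _

theorem recurseF_zeroN (fuel : Nat) (A : List (List Int)) (a bb : Int) :
    recurseF fuel A a bb 0 =
      (List.range A.length).any (fun l => (A.getD l []).contains a && (A.getD l []).contains bb) := by
  cases fuel <;> rw [recurseF] <;> simp

theorem lemA (bb : Int) : ∀ (k fuel : Nat) (A : List (List Int)) (a : Int), A.length ≤ fuel →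
    (recurseF fuel A a bb (k : Int) = true ↔
      ∃ i < A.length, a ∈ A.getD i [] ∧
        ∃ l r, FC (A.eraseIdx i) (A.getD i []) k l r ∧ bb ∈ l) := by
  intro k
  induction k with
  | zero =>
    intro fuel A a _
    simp only [Nat.cast_zero, recurseF_zeroN, List.any_eq_true, List.mem_range,
      Bool.and_eq_true, List.contains_iff_mem]
    constructor
    · rintro ⟨i, hi, ha, hb⟩
      exact ⟨i, hi, ha, A.getD i [], A.eraseIdx i, FC.zero _ _, hb⟩
    · rintro ⟨i, hi, ha, l, r, hfc, hb⟩
      obtain ⟨rfl, rfl⟩ := (FC_zero_iff _ _ _ _).1 hfc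
      exact ⟨i, hi, ha, hb⟩
  | succ k ih =>
    intro fuel A a hfuel
    have hne : ((k+1 : Nat) : Int) ≠ 0 := by push_cast; omega
    have hc : ((k+1 : Nat) : Int) - 1 = ((k : Nat) : Int) := by push_cast; ring
    cases fuel with
    | zero =>
      have hA : A = [] := List.length_eq_zero_iff.1 (Nat.le_zero.1 hfuel)
      subst hA
      rw [recurseF, if_neg hne]
      simp
    | succ f =>
      rw [recurseF, if_neg hne, List.any_eq_true]
      constructor
      · rintro ⟨l, hl, hcond⟩
        rw [List.mem_range] at hl
        rw [Bool.and_eq_true, List.any_eq_true] at hcond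
        have ha := hcond.1
        obtain ⟨h, hh', hrec⟩ := hcond.2
        rw [List.mem_range] at hh'
        rw [hc] at hrec
        have hfl : (A.eraseIdx l).length ≤ f := by
          rw [List.length_eraseIdx_of_lt hl]; omega
        obtain ⟨j, hj, hsj, l', r', hfc, hb⟩ := (ih f (A.eraseIdx l) _ hfl).1 hrec
        refine ⟨l, hl, by simpa using ha, l', r', ?_, hb⟩
        refine FC.succ j hj ⟨(A.getD l []).getD h 0, ?_, hsj⟩ hfc
        rw [List.getD_eq_getElem _ _ hh']
        exact (A.getD l []).getElem_mem hh'
      · rintro ⟨i, hi, ha, l', r', hfc, hb⟩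
        cases hfc with
        | succ j hj hx hfc' =>
          obtain ⟨s, hs1, hs2⟩ := hx
          obtain ⟨h, hh, hsh⟩ := List.mem_iff_getElem.1 hs1
          refine ⟨i, List.mem_range.2 hi, ?_⟩
          rw [Bool.and_eq_true, List.any_eq_true]
          refine ⟨by simpa using ha, h, List.mem_range.2 hh, ?_⟩
          rw [hc]
          have hfl : (A.eraseIdx i).length ≤ f := by
            rw [List.length_eraseIdx_of_lt hi]; omega
          refine (ih f (A.eraseIdx i) _ hfl).2 ⟨j, hj, ?_, l', r', hfc', hb⟩
          rw [List.getD_eq_getElem _ _ hh, hsh]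
          exact hs2

theorem foldl_add_mem {α β : Type} [BEq β] [LawfulBEq β] (l : List α) (p : α → Bool) (g : α → β)
    (x : β) : ∀ (s0 : PySem.Set β),
    (x ∈ l.foldl (fun s y => if p y then PySem.Set.add s (g y) else s) s0 ↔
      x ∈ s0 ∨ ∃ y ∈ l, p y = true ∧ x = g y) := by
  induction l with
  | nil => simp
  | cons y t ih =>
    intro s0
    simp only [List.foldl_cons, ih]
    by_cases hp : p y = true <;> simp [hp, PySem.Set.mem_add] <;> tauto

theorem mem_foldl_enum (L : List (List Int)) (p : List Int → Bool)
    (x : List (List Int) × List Int) (s0 : PySem.Set (List (List Int) × List Int)) :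
    x ∈ (PySem.List.enumerate L).foldl
        (fun s il => if p il.2 then PySem.Set.add s (L.eraseIdx il.1.toNat, il.2) else s) s0 ↔
      x ∈ s0 ∨ ∃ j < L.length, p (L.getD j []) = true ∧ x = (L.eraseIdx j, L.getD j []) := by
  rw [foldl_add_mem (PySem.List.enumerate L) (fun il => p il.2)
      (fun il => (L.eraseIdx il.1.toNat, il.2)) x s0]
  apply or_congr Iff.rfl
  constructor
  · rintro ⟨il, hil, hp, rfl⟩
    obtain ⟨j, hj, rfl⟩ := (PySem.List.mem_enumerate_iff _ _ _).1 hil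
    refine ⟨j, hj, ?_, ?_⟩ <;> simp_all
  · rintro ⟨j, hj, hp, rfl⟩
    refine ⟨((j : Int), L[j]), (PySem.List.mem_enumerate_iff _ _ _).2 ⟨j, hj, by simp⟩, ?_, ?_⟩ <;>
      simp_all

theorem mem_initB (A : List (List Int)) (a : Int) (rl : List (List Int) × List Int) :
    rl ∈ initB A a ↔ ∃ i < A.length, a ∈ A.getD i [] ∧ rl = (A.eraseIdx i, A.getD i []) := by
  unfold initB
  rw [mem_foldl_enum A (fun l => l.contains a) rl PySem.Set.empty]
  simp [PySem.Set.empty]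

theorem foldl_mono_mem {α β : Type} (l : List α) (F : List β → α → List β) (Q : α → Prop)
    (x : β) (hF : ∀ s y, x ∈ F s y ↔ x ∈ s ∨ Q y) :
    ∀ s0, x ∈ l.foldl F s0 ↔ x ∈ s0 ∨ ∃ y ∈ l, Q y := by
  induction l with
  | nil => simp
  | cons y t ih =>
    intro s0
    simp only [List.foldl_cons, ih, hF]
    constructor
    · rintro ((h | h) | ⟨z, hz, hq⟩)
      · exact Or.inl h
      · exact Or.inr ⟨y, List.mem_cons_self .., h⟩
      · exact Or.inr ⟨z, List.mem_cons_of_mem _ hz, hq⟩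
    · rintro (h | ⟨z, hz, hq⟩)
      · exact Or.inl (Or.inl h)
      · rcases List.mem_cons.1 hz with rfl | hz'
        · exact Or.inl (Or.inr hq)
        · exact Or.inr ⟨z, hz', hq⟩

theorem mem_stepB (fr : PySem.Set (List (List Int) × List Int))
    (rl : List (List Int) × List Int) :
    rl ∈ stepB fr ↔ ∃ rl' ∈ fr, ∃ j < rl'.1.length, (∃ s ∈ rl'.2, s ∈ rl'.1.getD j []) ∧
      rl = (rl'.1.eraseIdx j, rl'.1.getD j []) := by
  unfold stepB
  rw [foldl_mono_mem fr _
      (fun rl' => ∃ j < rl'.1.length, (∃ s ∈ rl'.2, s ∈ rl'.1.getD j []) ∧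
        rl = (rl'.1.eraseIdx j, rl'.1.getD j [])) rl ?_ PySem.Set.empty]
  · simp [PySem.Set.empty]
  · intro s y
    rw [mem_foldl_enum y.1 (fun l => y.2.any (fun s' => l.contains s')) rl s]
    apply or_congr Iff.rfl
    constructor
    · rintro ⟨j, hj, hp, rfl⟩
      refine ⟨j, hj, ?_, rfl⟩
      simpa [List.any_eq_true, List.contains_iff_mem] using hp
    · rintro ⟨j, hj, hx, rfl⟩
      refine ⟨j, hj, ?_, rfl⟩
      simpa [List.any_eq_true, List.contains_iff_mem] using hx

theorem FC_succ_snoc : ∀ (k : Nat) (S : List (List Int)) (l0 l : List Int) (r : List (List Int)),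
    FC S l0 (k+1) l r ↔ ∃ l1 r1, FC S l0 k l1 r1 ∧
      ∃ j < r1.length, (∃ s ∈ l1, s ∈ r1.getD j []) ∧ l = r1.getD j [] ∧ r = r1.eraseIdx j := by
  intro k
  induction k with
  | zero =>
    intro S l0 l r
    constructor
    · rintro h
      cases h with
      | succ i hi hx h' =>
        obtain ⟨rfl, rfl⟩ := (FC_zero_iff _ _ _ _).1 h'
        exact ⟨l0, S, FC.zero _ _, i, hi, hx, rfl, rfl⟩
    · rintro ⟨l1, r1, h01, j, hj, hx, rfl, rfl⟩
      obtain ⟨rfl, rfl⟩ := (FC_zero_iff _ _ _ _).1 h01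
      exact FC.succ j hj hx (FC.zero _ _)
  | succ k ih =>
    intro S l0 l r
    constructor
    · rintro h
      cases h with
      | succ i hi hx h' =>
        obtain ⟨l1, r1, hfc, j, hj, hx', h2, h1⟩ := (ih _ _ _ _).1 h'
        exact ⟨l1, r1, FC.succ i hi hx hfc, j, hj, hx', h2, h1⟩
    · rintro ⟨l1, r1, h1, j, hj, hx', h2, h3⟩
      cases h1 with
      | succ i hi hx h1' =>
        exact FC.succ i hi hx ((ih _ _ _ _).2 ⟨l1, r1, h1', j, hj, hx', h2, h3⟩)

theorem stepB_nil : stepB [] = [] := rfl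

theorem iter_stepB_nil (k : Nat) : (stepB)^[k] [] = [] := by
  induction k with
  | zero => rfl
  | succ k ih => rw [Function.iterate_succ_apply, stepB_nil, ih]

theorem mem_front (A : List (List Int)) (a : Int) : ∀ (k : Nat) (rl : List (List Int) × List Int),
    rl ∈ (stepB)^[k] (initB A a) ↔
      ∃ i < A.length, a ∈ A.getD i [] ∧ FC (A.eraseIdx i) (A.getD i []) k rl.2 rl.1 := by
  intro k
  induction k with
  | zero =>
    intro rl
    rw [Function.iterate_zero_apply, mem_initB]
    apply exists_congr; intro i
    apply and_congr Iff.rfl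
    apply and_congr Iff.rfl
    rw [FC_zero_iff, Prod.ext_iff]
    tauto
  | succ k ih =>
    intro rl
    rw [Function.iterate_succ_apply', mem_stepB]
    constructor
    · rintro ⟨rl', hmem, j, hj, hx, rfl⟩
      obtain ⟨i, hi, ha, hfc⟩ := (ih rl').1 hmem
      exact ⟨i, hi, ha, (FC_succ_snoc _ _ _ _ _).2 ⟨rl'.2, rl'.1, hfc, j, hj, hx, rfl, rfl⟩⟩
    · rintro ⟨i, hi, ha, hfc⟩
      obtain ⟨l1, r1, hfc1, j, hj, hx, h2, h1⟩ := (FC_succ_snoc _ _ _ _ _).1 hfc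
      exact ⟨(r1, l1), (ih _).2 ⟨i, hi, ha, hfc1⟩, j, hj, hx, Prod.ext_iff.2 ⟨h1, h2⟩⟩

theorem loopB_eq (b : Int) : ∀ (k : Nat) (fr : PySem.Set (List (List Int) × List Int)),
    loopB b k fr = ((stepB)^[k] fr).any (fun rl => rl.2.contains b) := by
  intro k
  induction k with
  | zero => intro fr; rfl
  | succ k ih =>
    intro fr
    by_cases h : fr.isEmpty
    · have : fr = [] := List.isEmpty_iff.1 h
      subst this
      simp [loopB, iter_stepB_nil]
    · simp only [loopB, if_neg h, ih, Function.iterate_succ_apply]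

-- ===== VERDICT (by name: the statement is the Claim_ definition above) =====
theorem recurse_spec : Claim_equal_recurse := by
  intro A a b n _
  unfold Spec_recurse recurse recurse_alt
  by_cases hn : n < 0
  · rw [if_pos hn, recurseF_neg _ _ _ _ _ hn]
  · rw [if_neg hn]
    have hk : n = ((n.toNat : Nat) : Int) := by omega
    rw [loopB_eq, Bool.eq_iff_iff, hk, lemA b n.toNat A.length A a (le_refl _),
      List.any_eq_true]
    constructor
    · rintro ⟨i, hi, ha, l, r, hfc, hb⟩
      exact ⟨(r, l), (mem_front A a _ _).2 ⟨i, hi, ha, hfc⟩, by simpa using hb⟩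
    · rintro ⟨rl, hmem, hb⟩
      obtain ⟨i, hi, ha, hfc⟩ := (mem_front A a _ _).1 hmem
      exact ⟨i, hi, ha, rl.2, rl.1, hfc, by simpa using hb⟩
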